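-- pv_equiv track=rewrite | github.com/fmromeiro/nn-asr-resources | data.py | _get_phoneme_transcript
-- ===== SOURCE A (Python) =====
-- def _get_phoneme_transcript(transcript, phon_dict):
--     """Convert a single transcript into its respective phonemes.
--
--     Args:
--         transcript: a list containing an audio transcript
--
--     Returns:
--         A list with the transcript's respective phoneme representation. Unknown words are replaced by the silence symbol
--         Returns None if the transcript is not valid.
--     """
--     phoneme_transcript = list()
--     for word in transcript.split():
--         if word in phon_dict.keys():
--             phoneme_transcript += phon_dict[word]
--         else:
--             return None
--
--     return phoneme_transcript
-- ===== SOURCE B (Python) =====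
-- def _get_phoneme_transcript(transcript, phon_dict):
--     """Recursive back-to-front version: translate the tail first, then prepend
--     this word's phonemes obtained via .get (None propagates upward)."""
--     def go(words):
--         if not words:
--             return []
--         rest = go(words[1:])
--         if rest is None:
--             return None
--         ps = phon_dict.get(words[0])
--         if ps is None:
--             return None
--         return list(ps) + rest
--     return go(transcript.split())
-- ===== Notes on version B (the rewrite author's own statement) =====
-- stated objective: alternative
-- what changed: Replaces the iterative left-to-right accumulator loop with early return None by a structural recursion that translates the tail of the word list first and prepends each word's phonemes (looked up via dict.get, None propagating upward) while unwinding, so the result is built back-to-front with no membership test and no early exit.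
import Mathlib
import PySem

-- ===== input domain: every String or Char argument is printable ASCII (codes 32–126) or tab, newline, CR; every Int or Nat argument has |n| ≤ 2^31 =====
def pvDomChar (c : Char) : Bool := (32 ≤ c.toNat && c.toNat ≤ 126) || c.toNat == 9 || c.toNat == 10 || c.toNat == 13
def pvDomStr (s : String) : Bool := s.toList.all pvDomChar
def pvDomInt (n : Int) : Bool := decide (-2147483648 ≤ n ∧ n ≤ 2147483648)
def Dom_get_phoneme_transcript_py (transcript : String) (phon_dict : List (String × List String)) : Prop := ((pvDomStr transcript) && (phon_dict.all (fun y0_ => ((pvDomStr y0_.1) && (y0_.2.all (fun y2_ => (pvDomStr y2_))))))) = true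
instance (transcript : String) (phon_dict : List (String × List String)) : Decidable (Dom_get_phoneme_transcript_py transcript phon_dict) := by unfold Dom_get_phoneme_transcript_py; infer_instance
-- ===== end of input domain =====

-- B replaces A's iterative accumulator loop with early exit by a back-to-front structural recursion
-- (tail first, prepend while unwinding, lookup via .get); return value only.
-- ===== PORT A =====
-- A's for-loop: early 'return None' on unknown word, accumulator phoneme_transcript grows by +=
def pyA_loop (d : PySem.Dict String (List String)) (acc : List String) : List String → Option (List String)
  | [] => some acc
  | w :: ws =>
    if d.contains w then
      pyA_loop d (acc ++ (d.get? w).getD []) ws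
    else
      none

def get_phoneme_transcript_py (transcript : String) (phon_dict : List (String × List String)) : Option (List String) :=
  pyA_loop (PySem.Dict.ofList phon_dict) [] (PySem.Str.split₀ transcript)

-- ===== PORT B =====
-- B's recursive go: translate the tail, then prepend this word's phonemes (None propagates)
def pyB_go (d : PySem.Dict String (List String)) : List String → Option (List String)
  | [] => some []
  | w :: ws =>
    match pyB_go d ws with
    | none => none
    | some rest =>
      match d.get? w with
      | none => none
      | some ps => some (ps ++ rest)

def get_phoneme_transcript_py_alt (transcript : String) (phon_dict : List (String × List String)) : Option (List String) :=
  pyB_go (PySem.Dict.ofList phon_dict) (PySem.Str.split₀ transcript)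

-- ===== PRECONDITION & SPEC =====
def Spec_get_phoneme_transcript_py (transcript : String) (phon_dict : List (String × List String)) (out : Option (List String)) : Prop := out = get_phoneme_transcript_py_alt transcript phon_dict
instance (transcript : String) (phon_dict : List (String × List String)) (out : Option (List String)) : Decidable (Spec_get_phoneme_transcript_py transcript phon_dict out) := by unfold Spec_get_phoneme_transcript_py; infer_instance

-- ===== CLAIM (what is proved, stated in full; the proofs are below) =====
def Claim_equal_get_phoneme_transcript_py : Prop := ∀ (transcript : String) (phon_dict : List (String × List String)), Dom_get_phoneme_transcript_py transcript phon_dict → Spec_get_phoneme_transcript_py transcript phon_dict (get_phoneme_transcript_py transcript phon_dict)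

-- ===== LEMMAS AND PROOFS =====
theorem pyA_loop_eq_pyB_go (d : PySem.Dict String (List String)) (ws : List String) (acc : List String) :
    pyA_loop d acc ws = (pyB_go d ws).map (fun r => acc ++ r) := by
  induction ws generalizing acc with
  | nil => simp [pyA_loop, pyB_go]
  | cons w ws ih =>
    simp only [pyA_loop, pyB_go]
    cases h : d.get? w with
    | none =>
      have hc : d.contains w = false := by
        simp [PySem.Dict.contains_eq_isSome_get?, h]
      cases pyB_go d ws <;> simp [hc]
    | some ps =>
      have hc : d.contains w = true := by
        simp [PySem.Dict.contains_eq_isSome_get?, h]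
      rw [if_pos hc, ih]
      cases pyB_go d ws <;> simp

-- ===== VERDICT (by name: the statement is the Claim_ definition above) =====
theorem get_phoneme_transcript_py_spec : Claim_equal_get_phoneme_transcript_py := by
  intro transcript phon_dict _
  unfold Spec_get_phoneme_transcript_py get_phoneme_transcript_py get_phoneme_transcript_py_alt
  rw [pyA_loop_eq_pyB_go]
  cases pyB_go (PySem.Dict.ofList phon_dict) (PySem.Str.split₀ transcript) <;> simp
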